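-- pv_equiv track=rewrite | github.com/gmate/gmate | plugins/gedit2/tm_autocomplete/tm_autocomplete.py | zip_no_truncation
-- ===== SOURCE A (Python) =====
-- def zip_no_truncation(v,w):
--   z = []
--   for i in range(max(len(v),len(w))):
--     if i < len(v):
--       z.append(v[i])
--     if i < len(w):
--       z.append(w[i])
--   return z
-- ===== SOURCE B (Python) =====
-- def zip_no_truncation(v, w):
--     n = min(len(v), len(w))
--     z = [x for pair in zip(v, w) for x in pair]
--     z.extend(v[n:])
--     z.extend(w[n:])
--     return z
-- ===== Notes on version B (the rewrite author's own statement) =====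
-- stated objective: idiomatic
-- what changed: Replaces the max-length index loop with two per-iteration bounds checks by a guard-free zip-based interleave of the common prefix followed by slice-based tails.
import Mathlib
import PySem

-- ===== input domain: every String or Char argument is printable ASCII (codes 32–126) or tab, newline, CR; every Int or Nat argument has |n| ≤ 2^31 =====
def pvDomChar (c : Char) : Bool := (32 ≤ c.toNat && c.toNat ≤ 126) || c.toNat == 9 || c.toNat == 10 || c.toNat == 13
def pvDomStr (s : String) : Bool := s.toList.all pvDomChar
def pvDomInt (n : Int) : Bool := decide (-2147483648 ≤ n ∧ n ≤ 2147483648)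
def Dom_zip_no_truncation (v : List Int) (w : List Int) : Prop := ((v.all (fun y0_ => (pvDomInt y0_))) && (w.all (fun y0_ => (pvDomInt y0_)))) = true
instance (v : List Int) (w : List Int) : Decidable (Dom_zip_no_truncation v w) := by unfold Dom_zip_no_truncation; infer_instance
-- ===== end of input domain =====

-- B interleaves the zipped common prefix guard-free and appends the slice tails; same cost, no per-iteration bounds checks (objective: idiomatic).

-- ===== PORT A =====
-- literal port: loop i over range(max(len v, len w)) with the two in-bounds guards,
-- appending v[i] and/or w[i] (the guards make each access in range, so pyGetD is exact)
def zip_no_truncation (v : List Int) (w : List Int) : List Int :=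
  (PySem.List.pyRange 0 ((max v.length w.length : Nat) : Int) 1).foldl
    (fun z i =>
      let z1 := if i < (v.length : Int) then z ++ [PySem.List.pyGetD v i 0] else z
      if i < (w.length : Int) then z1 ++ [PySem.List.pyGetD w i 0] else z1)
    []

-- ===== PORT B =====
-- literal port of Source B: n = min of lengths; interleave zip(v,w); extend with v[n:] and w[n:]
-- (v[n:] with 0 ≤ n is List.drop n — exact here)
def zip_no_truncation_alt (v : List Int) (w : List Int) : List Int :=
  let n := min v.length w.length
  ((v.zip w).flatMap (fun p => [p.1, p.2])) ++ v.drop n ++ w.drop n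

-- ===== PRECONDITION & SPEC =====
def Spec_zip_no_truncation (v : List Int) (w : List Int) (out : List Int) : Prop := out = zip_no_truncation_alt v w
instance (v : List Int) (w : List Int) (out : List Int) : Decidable (Spec_zip_no_truncation v w out) := by unfold Spec_zip_no_truncation; infer_instance

-- ===== CLAIM (what is proved, stated in full; the proofs are below) =====
def Claim_equal_zip_no_truncation : Prop := ∀ (v : List Int) (w : List Int), Dom_zip_no_truncation v w → Spec_zip_no_truncation v w (zip_no_truncation v w)

-- ===== LEMMAS AND PROOFS =====

-- the per-index contribution of A's loop body
def pvStep (v w : List Int) (k : Nat) : List Int :=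
  (if k < v.length then [v.getD k 0] else []) ++ (if k < w.length then [w.getD k 0] else [])

theorem flatMap_singleton_of_mem (l : List Nat) (f : Nat → List Int) (g : Nat → Int)
    (h : ∀ x ∈ l, f x = [g x]) : l.flatMap f = l.map g := by
  induction l with
  | nil => simp
  | cons a t ih =>
    simp only [List.flatMap_cons, List.map_cons, h a (by simp)]
    rw [ih (fun x hx => h x (by simp [hx]))]
    rfl

theorem map_getD_range (w : List Int) :
    (List.range w.length).map (fun k => w.getD k 0) = w := by
  induction w with
  | nil => simp
  | cons a t ih =>
    simp [List.range_succ_eq_map, List.map_map, Function.comp_def]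
    exact ih

theorem flatMap_pvStep (v w : List Int) :
    (List.range (max v.length w.length)).flatMap (pvStep v w) = zip_no_truncation_alt v w := by
  induction v generalizing w with
  | nil =>
    simp only [zip_no_truncation_alt, List.length_nil, Nat.zero_min, List.zip_nil_left,
      List.flatMap_nil, List.drop_zero, Nat.max_eq_right (Nat.zero_le _), List.nil_append,
      List.drop_nil, List.append_nil]
    rw [flatMap_singleton_of_mem _ _ (fun k => w.getD k 0)
      (fun k hk => by simp [pvStep, List.mem_range.mp hk]), map_getD_range]
  | cons a t ih =>
    cases w with
    | nil =>
      simp only [zip_no_truncation_alt, List.length_nil, Nat.min_zero, List.zip_nil_right,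
        List.flatMap_nil, List.drop_zero, Nat.max_eq_left (Nat.zero_le _), List.nil_append,
        List.drop_nil, List.append_nil]
      rw [flatMap_singleton_of_mem _ _ (fun k => (a :: t).getD k 0)
        (fun k hk => by
          have h2 := List.mem_range.mp hk
          simp only [List.length_cons] at h2
          simp [pvStep]
          omega), map_getD_range]
    | cons b u =>
      have hmax : max (a :: t).length (b :: u).length = max t.length u.length + 1 := by
        simp [Nat.succ_max_succ]
      rw [hmax, List.range_succ_eq_map, List.flatMap_cons, List.flatMap_map]
      have hstep : (fun k => pvStep (a :: t) (b :: u) k.succ) = pvStep t u := by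
        funext k
        simp [pvStep]
      rw [hstep, ih]
      simp [pvStep, zip_no_truncation_alt, Nat.succ_min_succ]

-- ===== VERDICT (by name: the statement is the Claim_ definition above) =====
theorem zip_no_truncation_spec : Claim_equal_zip_no_truncation := by
  intro v w _
  show zip_no_truncation v w = zip_no_truncation_alt v w
  unfold zip_no_truncation
  have hfun : (fun (z : List Int) (i : Int) =>
      let z1 := if i < (v.length : Int) then z ++ [PySem.List.pyGetD v i 0] else z
      if i < (w.length : Int) then z1 ++ [PySem.List.pyGetD w i 0] else z1)
      = fun z i => z ++ ((if i < (v.length : Int) then [PySem.List.pyGetD v i 0] else [])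
          ++ (if i < (w.length : Int) then [PySem.List.pyGetD w i 0] else [])) := by
    funext z i
    by_cases h1 : i < (v.length : Int) <;> by_cases h2 : i < (w.length : Int) <;>
      simp [h1, h2]
  rw [hfun, PySem.List.foldl_append_eq_flatMap, PySem.List.pyRange_zero_natCast,
    List.flatMap_map, List.nil_append]
  rw [← flatMap_pvStep v w]
  congr 1
  funext k
  simp [pvStep]
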